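-- pv_equiv track=rewrite | github.com/FoodieFridays/partitions-test | random_partition.py | get_multiplicity_vector
-- ===== SOURCE A (Python) =====
-- def multiplicity_of_idx(i, array):
--     return array.count(array[i])
--
-- def get_multiplicity_vector(array):
--     array.sort(reverse=True)
--     lamb = "("
--
--     # Using our above multiplicity function to generate the multiplicity vector
--     for i in range(len(array)):
--         if i == 0:
--             lamb += str(array[i]) + "^{" + str(multiplicity_of_idx(i, array)) + "}"
--         elif array[i] != array[i - 1]:
--             if i == len(array) - 1:
--                 lamb += ", " + str(array[i]) + "^{" + str(multiplicity_of_idx(i, array)) + "}"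
--             else:
--                 lamb += ", " + str(array[i]) + "^{" + str(multiplicity_of_idx(i, array)) + "}"
--
--     lamb += ")"
--
--     return lamb
-- ===== SOURCE B (Python) =====
-- def get_multiplicity_vector(array):
--     # Same in-place descending sort as A; then one counting pass + distinct-value iteration
--     array.sort(reverse=True)
--     counts = {}
--     for v in array:
--         counts[v] = counts.get(v, 0) + 1
--     return "(" + ", ".join(str(v) + "^{" + str(c) + "}" for v, c in counts.items()) + ")"
-- ===== Notes on version B (the rewrite author's own statement) =====
-- stated objective: faster
-- what changed: Replaces the per-index neighbour-comparison loop with repeated full-array count() scans by a single counting pass into an insertion-ordered dict after the same in-place descending sort, then formats the distinct values directly from the dict items.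
import Mathlib
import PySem

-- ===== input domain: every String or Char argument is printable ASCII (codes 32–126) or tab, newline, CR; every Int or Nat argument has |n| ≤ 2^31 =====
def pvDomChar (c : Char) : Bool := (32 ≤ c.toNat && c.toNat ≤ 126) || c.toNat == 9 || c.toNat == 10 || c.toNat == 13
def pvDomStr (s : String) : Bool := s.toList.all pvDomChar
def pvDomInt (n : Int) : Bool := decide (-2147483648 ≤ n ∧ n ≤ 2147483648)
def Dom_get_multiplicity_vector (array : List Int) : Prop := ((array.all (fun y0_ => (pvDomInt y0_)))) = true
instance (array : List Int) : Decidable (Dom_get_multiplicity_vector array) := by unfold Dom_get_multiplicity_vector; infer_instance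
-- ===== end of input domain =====

-- B replaces A's index loop with its repeated full-array count() scans by one counting pass into an
-- insertion-ordered dict after the same in-place descending sort (both Pythons mutate the argument
-- identically; the equivalence proved here is about the return value).

-- ===== PORT A =====
def multiplicity_of_idx (i : Int) (array : List Int) : Int :=
  ((PySem.List.count array (PySem.List.pyGetD array i 0) : Nat) : Int)

def get_multiplicity_vector (array : List Int) : String :=
  let arr := PySem.List.sorted array (fun x => x) true
  let lamb := "("
  let lamb := (PySem.List.pyRange 0 (PySem.List.len arr) 1).foldl (fun lamb i =>
    if i = 0 then
      lamb ++ PySem.Int.toStr (PySem.List.pyGetD arr i 0) ++ "^{" ++ PySem.Int.toStr (multiplicity_of_idx i arr) ++ "}"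
    else if PySem.List.pyGetD arr i 0 ≠ PySem.List.pyGetD arr (i - 1) 0 then
      (if i = PySem.List.len arr - 1 then
        lamb ++ ", " ++ PySem.Int.toStr (PySem.List.pyGetD arr i 0) ++ "^{" ++ PySem.Int.toStr (multiplicity_of_idx i arr) ++ "}"
      else
        lamb ++ ", " ++ PySem.Int.toStr (PySem.List.pyGetD arr i 0) ++ "^{" ++ PySem.Int.toStr (multiplicity_of_idx i arr) ++ "}")
    else lamb) lamb
  lamb ++ ")"

-- ===== PORT B =====
def get_multiplicity_vector_alt (array : List Int) : String :=
  let arr := PySem.List.sorted array (fun x => x) true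
  let counts := arr.foldl (fun d v => d.insert v (d.getD v 0 + 1)) PySem.Dict.empty
  "(" ++ PySem.Str.join ", " (counts.items.map (fun p => PySem.Int.toStr p.1 ++ "^{" ++ PySem.Int.toStr p.2 ++ "}")) ++ ")"

-- ===== PRECONDITION & SPEC =====
def Spec_get_multiplicity_vector (array : List Int) (out : String) : Prop := out = get_multiplicity_vector_alt array
instance (array : List Int) (out : String) : Decidable (Spec_get_multiplicity_vector array out) := by unfold Spec_get_multiplicity_vector; infer_instance

-- ===== CLAIM (what is proved, stated in full; the proofs are below) =====
def Claim_equal_get_multiplicity_vector : Prop := ∀ (array : List Int), Dom_get_multiplicity_vector array → Spec_get_multiplicity_vector array (get_multiplicity_vector array)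

-- ===== LEMMAS AND PROOFS =====

-- one formatted entry "v^{c}"
def pvEnt (v c : Int) : String := PySem.Int.toStr v ++ "^{" ++ PySem.Int.toStr c ++ "}"

-- the run-start values of t, given the element preceding t
def pvRuns (prev : Int) : List Int → List Int
  | [] => []
  | w :: ws => if w ≠ prev then w :: pvRuns w ws else pvRuns prev ws

-- A's tail loop (indices ≥ 1), re-expressed structurally over the suffix with its predecessor
def pvLoopT (s : List Int) (prev : Int) : List Int → String → String
  | [], acc => acc
  | w :: ws, acc =>
      pvLoopT s w ws (if w ≠ prev then acc ++ ", " ++ pvEnt w ((List.count w s : Nat) : Int) else acc)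

-- concatenation of a list of strings
def pvCat (l : List String) : String := l.foldl (· ++ ·) ""

lemma pvFoldl_append (l : List String) : ∀ a : String, l.foldl (· ++ ·) a = a ++ l.foldl (· ++ ·) "" := by
  induction l with
  | nil => intro a; simp [String.append_empty]
  | cons y ys ih =>
      intro a
      simp only [List.foldl_cons]
      rw [ih (a ++ y), ih ("" ++ y)]
      simp [String.append_assoc, String.empty_append]

lemma pvCat_cons (x : String) (l : List String) : pvCat (x :: l) = x ++ pvCat l := by
  simp only [pvCat, List.foldl_cons]
  rw [pvFoldl_append l]
  simp [String.empty_append]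

lemma pvJoin_singleton (sep e : String) : PySem.Str.join sep [e] = e := by
  have h1 : (PySem.Str.join sep [e]).toList = e.toList := by
    rw [PySem.Str.toList_join]; simp [PySem.Chars.join_singleton]
  calc PySem.Str.join sep [e] = String.ofList (PySem.Str.join sep [e]).toList := (String.ofList_toList).symm
    _ = String.ofList e.toList := by rw [h1]
    _ = e := String.ofList_toList

lemma pvJoin_cons_cons (sep p q : String) (rest : List String) :
    PySem.Str.join sep (p :: q :: rest) = p ++ sep ++ PySem.Str.join sep (q :: rest) := by
  have h1 : (PySem.Str.join sep (p :: q :: rest)).toList = (p ++ sep ++ PySem.Str.join sep (q :: rest)).toList := by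
    rw [PySem.Str.toList_join]
    simp only [List.map_cons, PySem.Chars.join_cons_cons, String.toList_append, PySem.Str.toList_join]
  calc PySem.Str.join sep (p :: q :: rest)
      = String.ofList (PySem.Str.join sep (p :: q :: rest)).toList := (String.ofList_toList).symm
    _ = String.ofList (p ++ sep ++ PySem.Str.join sep (q :: rest)).toList := by rw [h1]
    _ = _ := String.ofList_toList

lemma pvJoin_eq (e : String) (es : List String) :
    PySem.Str.join ", " (e :: es) = e ++ pvCat (es.map (fun x => ", " ++ x)) := by
  induction es generalizing e with
  | nil => simp [pvJoin_singleton, pvCat, String.append_empty]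
  | cons x rest ih =>
      rw [pvJoin_cons_cons, ih x, List.map_cons, pvCat_cons]
      simp [String.append_assoc]

lemma pvLoopT_eq (s : List Int) : ∀ (t : List Int) (prev : Int) (acc : String),
    pvLoopT s prev t acc
      = acc ++ pvCat ((pvRuns prev t).map (fun w => ", " ++ pvEnt w ((List.count w s : Nat) : Int))) := by
  intro t
  induction t with
  | nil => intro prev acc; simp [pvLoopT, pvRuns, pvCat, String.append_empty]
  | cons w ws ih =>
      intro prev acc
      by_cases h : w = prev
      · subst h
        simp only [pvLoopT, pvRuns, ne_eq, not_true_eq_false, if_false]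
        exact ih w acc
      · simp only [pvLoopT, pvRuns, ne_eq, h, not_false_eq_true, if_pos]
        rw [ih, List.map_cons, pvCat_cons]
        simp [String.append_assoc]

lemma pvAddFold : ∀ (t : List Int) (acc : List Int) (prev : Int),
    t.Pairwise (fun a b => b ≤ a) → (∀ w ∈ t, w ≤ prev) → (∀ w ∈ t, w ∈ acc → w = prev) → prev ∈ acc →
    t.foldl PySem.Set.add acc = acc ++ pvRuns prev t := by
  intro t
  induction t with
  | nil => intro acc prev _ _ _ _; simp [pvRuns]
  | cons w ws ih =>
      intro acc prev hpw hle hmem hprev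
      rw [List.pairwise_cons] at hpw
      by_cases h : w = prev
      · subst h
        have hadd : PySem.Set.add acc w = acc := by
          simp [PySem.Set.add, PySem.Set.contains, hprev]
        simp only [List.foldl_cons, hadd, pvRuns, ne_eq, not_true_eq_false, if_false]
        exact ih acc w hpw.2 (fun u hu => hpw.1 u hu) (fun u hu ha => hmem u (by simp [hu]) ha) hprev
      · have hwlt : w < prev := lt_of_le_of_ne (hle w (by simp)) h
        have hnot : w ∉ acc := fun hc => h (hmem w (by simp) hc)
        have hadd : PySem.Set.add acc w = acc ++ [w] := by
          simp [PySem.Set.add, PySem.Set.contains, hnot]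
        simp only [List.foldl_cons, hadd, pvRuns, ne_eq, h, not_false_eq_true, if_pos]
        rw [ih (acc ++ [w]) w hpw.2 (fun u hu => hpw.1 u hu)
          (fun u hu ha => by
            rcases List.mem_append.mp ha with h1 | h1
            · exact absurd (hmem u (by simp [hu]) h1) (by
                have : u ≤ w := hpw.1 u hu
                intro he; rw [he] at this; exact absurd this hwlt.not_ge)
            · simpa using h1)
          (by simp)]
        simp

lemma pvIdxLoop (s : List Int) : ∀ (t : List Int) (k : Nat) (prev : Int), 1 ≤ k → s.drop k = t →
    s.getD (k - 1) 0 = prev → ∀ acc : String,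
    (PySem.List.pyRange (k : Int) (PySem.List.len s) 1).foldl
      (fun acc i =>
        if PySem.List.pyGetD s i 0 ≠ PySem.List.pyGetD s (i - 1) 0 then
          acc ++ ", " ++ pvEnt (PySem.List.pyGetD s i 0) ((List.count (PySem.List.pyGetD s i 0) s : Nat) : Int)
        else acc) acc
    = pvLoopT s prev t acc := by
  intro t
  induction t with
  | nil =>
      intro k prev hk hdrop hprev acc
      have hlen : s.length ≤ k := List.drop_eq_nil_iff.mp hdrop
      rw [PySem.List.pyRange_one_eq_nil (by simp [PySem.List.len]; exact_mod_cast hlen)]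
      simp [pvLoopT]
  | cons w ws ih =>
      intro k prev hk hdrop hprev acc
      have hklt : k < s.length := by
        by_contra hc
        rw [Nat.not_lt] at hc
        rw [List.drop_eq_nil_iff.mpr hc] at hdrop
        exact absurd hdrop (by simp)
      have hgetk : s.getD k 0 = w := by
        have h0 : (s.drop k).getD 0 0 = w := by rw [hdrop]; rfl
        rwa [List.getD_eq_getElem?_getD, List.getElem?_drop, Nat.add_zero,
          ← List.getD_eq_getElem?_getD] at h0
      rw [PySem.List.pyRange_one_cons (by simp [PySem.List.len]; exact_mod_cast hklt)]
      rw [List.foldl_cons]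
      have e1 : PySem.List.pyGetD s (k : Int) 0 = w := by
        rw [PySem.List.pyGetD_natCast]; exact hgetk
      have e2 : PySem.List.pyGetD s ((k : Int) - 1) 0 = prev := by
        have : ((k : Int) - 1) = ((k - 1 : Nat) : Int) := by omega
        rw [this, PySem.List.pyGetD_natCast]; exact hprev
      rw [e1, e2]
      have hdrop' : s.drop (k + 1) = ws := by
        have h1 : s.drop (k + 1) = (s.drop k).drop 1 := by
          rw [List.drop_drop]
        rw [h1, hdrop]
        rfl
      have hcast : (k : Int) + 1 = ((k + 1 : Nat) : Int) := by omega
      rw [hcast, ih (k + 1) w (by omega) hdrop' (by simpa using hgetk)]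
      by_cases h : w = prev
      · subst h
        simp [pvLoopT]
      · simp only [ne_eq, h, not_false_eq_true, if_pos]
        simp [pvLoopT, h]

lemma pvOfList (v : Int) (t : List Int) (h : (v :: t).Pairwise (fun a b => b ≤ a)) :
    PySem.Set.ofList (v :: t) = v :: pvRuns v t := by
  rw [PySem.Set.ofList_eq_foldl, List.foldl_cons]
  rw [List.pairwise_cons] at h
  have hadd : PySem.Set.add ([] : PySem.Set Int) v = [v] := by
    simp [PySem.Set.add, PySem.Set.contains]
  rw [hadd, pvAddFold t [v] v h.2 h.1 (fun u _ ha => by simpa using ha) (by simp)]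
  simp

lemma pvMain (s : List Int) (hs : s.Pairwise (fun a b => b ≤ a)) :
    ((PySem.List.pyRange 0 (PySem.List.len s) 1).foldl (fun lamb i =>
      if i = 0 then
        lamb ++ PySem.Int.toStr (PySem.List.pyGetD s i 0) ++ "^{" ++ PySem.Int.toStr (multiplicity_of_idx i s) ++ "}"
      else if PySem.List.pyGetD s i 0 ≠ PySem.List.pyGetD s (i - 1) 0 then
        (if i = PySem.List.len s - 1 then
          lamb ++ ", " ++ PySem.Int.toStr (PySem.List.pyGetD s i 0) ++ "^{" ++ PySem.Int.toStr (multiplicity_of_idx i s) ++ "}"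
        else
          lamb ++ ", " ++ PySem.Int.toStr (PySem.List.pyGetD s i 0) ++ "^{" ++ PySem.Int.toStr (multiplicity_of_idx i s) ++ "}")
      else lamb) "(") ++ ")"
    = "(" ++ PySem.Str.join ", "
        ((s.foldl (fun d v => d.insert v (d.getD v 0 + 1)) PySem.Dict.empty).items.map
          (fun p => PySem.Int.toStr p.1 ++ "^{" ++ PySem.Int.toStr p.2 ++ "}")) ++ ")" := by
  rw [PySem.Dict.foldl_insert_getD_add_one_eq_counter, PySem.Dict.items_counter]
  cases s with
  | nil =>
      rw [PySem.List.pyRange_one_eq_nil (by simp [PySem.List.len])]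
      decide
  | cons v t =>
      have hlen : PySem.List.len (v :: t) = ((t.length + 1 : Nat) : Int) := by
        simp [PySem.List.len]
      have hpos : (0 : Int) < PySem.List.len (v :: t) := by rw [hlen]; positivity
      rw [PySem.List.pyRange_one_cons hpos, List.foldl_cons]
      have h0 : (if (0 : Int) = 0 then
          "(" ++ PySem.Int.toStr (PySem.List.pyGetD (v :: t) 0 0) ++ "^{" ++ PySem.Int.toStr (multiplicity_of_idx 0 (v :: t)) ++ "}"
        else if PySem.List.pyGetD (v :: t) 0 0 ≠ PySem.List.pyGetD (v :: t) (0 - 1) 0 then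
          (if (0 : Int) = PySem.List.len (v :: t) - 1 then
            "(" ++ ", " ++ PySem.Int.toStr (PySem.List.pyGetD (v :: t) 0 0) ++ "^{" ++ PySem.Int.toStr (multiplicity_of_idx 0 (v :: t)) ++ "}"
          else
            "(" ++ ", " ++ PySem.Int.toStr (PySem.List.pyGetD (v :: t) 0 0) ++ "^{" ++ PySem.Int.toStr (multiplicity_of_idx 0 (v :: t)) ++ "}")
        else "(")
        = "(" ++ pvEnt v ((List.count v (v :: t) : Nat) : Int) := by
        simp only [pvEnt, multiplicity_of_idx, String.append_assoc]
        have : PySem.List.pyGetD (v :: t) 0 0 = v := by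
          simp
        rw [this, PySem.List.count_eq]
        simp
      rw [h0]
      have hcongr : (PySem.List.pyRange (0 + 1) (PySem.List.len (v :: t)) 1).foldl (fun lamb i =>
          if i = 0 then
            lamb ++ PySem.Int.toStr (PySem.List.pyGetD (v :: t) i 0) ++ "^{" ++ PySem.Int.toStr (multiplicity_of_idx i (v :: t)) ++ "}"
          else if PySem.List.pyGetD (v :: t) i 0 ≠ PySem.List.pyGetD (v :: t) (i - 1) 0 then
            (if i = PySem.List.len (v :: t) - 1 then
              lamb ++ ", " ++ PySem.Int.toStr (PySem.List.pyGetD (v :: t) i 0) ++ "^{" ++ PySem.Int.toStr (multiplicity_of_idx i (v :: t)) ++ "}"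
            else
              lamb ++ ", " ++ PySem.Int.toStr (PySem.List.pyGetD (v :: t) i 0) ++ "^{" ++ PySem.Int.toStr (multiplicity_of_idx i (v :: t)) ++ "}")
          else lamb) ("(" ++ pvEnt v ((List.count v (v :: t) : Nat) : Int))
        = (PySem.List.pyRange ((1 : Nat) : Int) (PySem.List.len (v :: t)) 1).foldl (fun acc i =>
            if PySem.List.pyGetD (v :: t) i 0 ≠ PySem.List.pyGetD (v :: t) (i - 1) 0 then
              acc ++ ", " ++ pvEnt (PySem.List.pyGetD (v :: t) i 0) ((List.count (PySem.List.pyGetD (v :: t) i 0) (v :: t) : Nat) : Int)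
            else acc) ("(" ++ pvEnt v ((List.count v (v :: t) : Nat) : Int)) := by
        have : ((1 : Nat) : Int) = 0 + 1 := by omega
        rw [this]
        apply PySem.List.foldl_congr_mem
        intro acc i hi
        have hi1 : 1 ≤ i := (PySem.List.mem_pyRange_one.mp hi).1
        rw [if_neg (by omega)]
        by_cases hne : PySem.List.pyGetD (v :: t) i 0 ≠ PySem.List.pyGetD (v :: t) (i - 1) 0
        · rw [if_pos hne, if_pos hne, ite_self]
          simp [pvEnt, multiplicity_of_idx, PySem.List.count_eq, String.append_assoc]
        · rw [if_neg hne, if_neg hne]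
      rw [hcongr]
      rw [pvIdxLoop (v :: t) t 1 v (by omega) (by rfl) (by rfl)]
      rw [pvLoopT_eq]
      rw [pvOfList v t hs]
      simp only [List.map_cons]
      rw [pvJoin_eq]
      simp [Function.comp_def, pvEnt, String.append_assoc, List.map_map]

-- ===== VERDICT (by name: the statement is the Claim_ definition above) =====
theorem get_multiplicity_vector_spec : Claim_equal_get_multiplicity_vector := by
  intro array _
  show get_multiplicity_vector array = get_multiplicity_vector_alt array
  unfold get_multiplicity_vector get_multiplicity_vector_alt
  exact pvMain (PySem.List.sorted array (fun x => x) true) (PySem.List.sorted_pairwise_rev array (fun x => x))
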